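-- pv_equiv track=rewrite | github.com/danivilardell/xrpl_zkbridge_prover | ecdsa_nova/test_signature_ver.py | bigint_to_array
-- ===== SOURCE A (Python) =====
-- def bigint_to_array(n, k, x):
--     mod = 1 << n
--     ret = []
--     x_temp = x
--     for idx in range(k):
--         ret.append(str(x_temp % mod))
--         x_temp //= mod
--     return ret
-- ===== SOURCE B (Python) =====
-- def bigint_to_array(n, k, x):
--     if k > 0 and x < 0:
--         # the k limbs of x are those of its k-limb two's-complement residue
--         x %= 1 << (n * k)
--     out = []
--     _limbs(n, k, x, out)
--     return out
--
-- def _limbs(n, k, x, out):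
--     if k <= 0:
--         return
--     if k == 1:
--         out.append(str(x % (1 << n)))
--         return
--     h = k // 2
--     q = x >> (n * h)
--     _limbs(n, h, x - (q << (n * h)), out)
--     _limbs(n, k - h, q, out)
-- ===== Notes on version B (the rewrite author's own statement) =====
-- stated objective: alternative
-- what changed: Replaces A's linear loop threading a quotient accumulator by a balanced divide-and-conquer recursion: a negative x is normalized once to its k-limb two's-complement residue, then the limb list is built by splitting at the middle limb boundary (high half q = x >> n*h, low half x - (q << n*h), h = k//2) and concatenating the recursive results.
import Mathlib
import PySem

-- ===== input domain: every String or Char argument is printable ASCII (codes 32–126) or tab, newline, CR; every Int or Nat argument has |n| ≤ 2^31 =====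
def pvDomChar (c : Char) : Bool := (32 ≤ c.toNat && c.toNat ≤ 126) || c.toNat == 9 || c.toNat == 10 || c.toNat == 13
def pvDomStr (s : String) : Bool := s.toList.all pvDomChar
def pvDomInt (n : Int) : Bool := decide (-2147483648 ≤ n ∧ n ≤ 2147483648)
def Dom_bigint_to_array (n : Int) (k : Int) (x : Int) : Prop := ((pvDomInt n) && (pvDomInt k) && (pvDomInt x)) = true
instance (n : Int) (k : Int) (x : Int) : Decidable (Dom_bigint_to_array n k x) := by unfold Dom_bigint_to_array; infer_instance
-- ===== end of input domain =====

-- B replaces A's linear loop threading a quotient accumulator by a balanced divide-and-conquer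
-- recursion splitting x at the middle limb boundary (negative x normalized once to its k-limb
-- residue); same output, no speed claim.

-- ===== PORT A =====
-- 'mod = 1 << n' raises for n < 0 in Python; Pre_ requires 0 ≤ n, under which 1 << n = 2 ^ n.toNat.
def bigint_to_array (n : Int) (k : Int) (x : Int) : List String :=
  let mod : Int := 2 ^ n.toNat
  ((PySem.List.pyRange 0 k 1).foldl
    (fun (st : List String × Int) _ =>
      (st.1 ++ [PySem.Int.toStr (PySem.Int.mod st.2 mod)], PySem.Int.floordiv st.2 mod))
    ([], x)).1

-- ===== PORT B =====
-- Divide and conquer (helper _limbs): high half of the limbs comes from q = x >> (n*h),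
-- low half from x - (q << (n*h)), h = k // 2; 'x >> s'/'q << s' with s ≥ 0 are
-- Int.shiftRight/shiftLeft (floor shift, exact for negative x too). '1 << n' and the top-level
-- '1 << (n*k)' need 0 ≤ n (Pre_); under Pre_ the shift amounts are ≥ 0, so they are 2 ^ (·).toNat.
-- _limbs appends into the shared output list 'out'; the port threads that list as an accumulator.
def pvLimbs (n : Int) (k : Int) (x : Int) (out : List String) : List String :=
  if k ≤ 0 then out
  else if k = 1 then out ++ [PySem.Int.toStr (PySem.Int.mod x (2 ^ n.toNat))]
  else
    pvLimbs n (k - PySem.Int.floordiv k 2)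
      (x >>> (n * PySem.Int.floordiv k 2).toNat)
      (pvLimbs n (PySem.Int.floordiv k 2)
        (x - ((x >>> (n * PySem.Int.floordiv k 2).toNat) <<< (n * PySem.Int.floordiv k 2).toNat))
        out)
termination_by k.toNat
decreasing_by
  · rw [PySem.Int.floordiv_eq_ediv_of_pos (by omega)]; omega
  · rw [PySem.Int.floordiv_eq_ediv_of_pos (by omega)]; omega

def bigint_to_array_alt (n : Int) (k : Int) (x : Int) : List String :=
  if 0 < k ∧ x < 0 then pvLimbs n k (PySem.Int.mod x (2 ^ (n * k).toNat)) []
  else pvLimbs n k x []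

-- ===== PRECONDITION & SPEC =====
-- Pre_ excludes exactly n < 0, where Python's '1 << n' raises ValueError.
def Pre_bigint_to_array (n : Int) (_k : Int) (_x : Int) : Prop := 0 ≤ n
instance (n : Int) (k : Int) (x : Int) : Decidable (Pre_bigint_to_array n k x) := by unfold Pre_bigint_to_array; infer_instance
def pvWitness_bigint_to_array : Int × Int × Int := (4, 3, -1234)

def Spec_bigint_to_array (n : Int) (k : Int) (x : Int) (out : List String) : Prop := out = bigint_to_array_alt n k x
instance (n : Int) (k : Int) (x : Int) (out : List String) : Decidable (Spec_bigint_to_array n k x out) := by unfold Spec_bigint_to_array; infer_instance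

-- ===== CLAIM (what is proved, stated in full; the proofs are below) =====
def Claim_equal_bigint_to_array : Prop := ∀ (n : Int) (k : Int) (x : Int), Dom_bigint_to_array n k x → Pre_bigint_to_array n k x → Spec_bigint_to_array n k x (bigint_to_array n k x)

-- ===== LEMMAS AND PROOFS =====

-- A's loop with state (acc, x_temp), as a recursion on the trip count
def limbsA (mod : Int) : Nat → Int → List String
  | 0, _ => []
  | K + 1, x => PySem.Int.toStr (PySem.Int.mod x mod) :: limbsA mod K (PySem.Int.floordiv x mod)

lemma foldA_eq_limbsA (mod : Int) (l : List Int) (acc : List String) (x : Int) :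
    (l.foldl (fun (st : List String × Int) _ =>
        (st.1 ++ [PySem.Int.toStr (PySem.Int.mod st.2 mod)], PySem.Int.floordiv st.2 mod))
      (acc, x)).1 = acc ++ limbsA mod l.length x := by
  induction l generalizing acc x with
  | nil => simp [limbsA]
  | cons h t ih => simp [List.foldl_cons, ih, limbsA]

lemma limbsA_eq_map (mod : Int) (hmod : 0 < mod) (K : Nat) (x : Int) :
    limbsA mod K x = (List.range K).map (fun i => PySem.Int.toStr ((x / mod ^ i) % mod)) := by
  induction K generalizing x with
  | zero => simp [limbsA]
  | succ K ih =>
    rw [limbsA, ih, List.range_succ_eq_map]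
    simp only [List.map_cons, List.map_map]
    refine congrArg₂ _ ?_ (List.map_congr_left ?_)
    · rw [PySem.Int.mod_eq_emod_of_pos hmod, pow_zero, Int.ediv_one]
    · intro i _
      simp only [Function.comp_apply]
      rw [PySem.Int.floordiv_eq_ediv_of_pos hmod,
          Int.ediv_ediv_of_nonneg hmod.le, ← pow_succ']

-- limb i of (x % b^h) equals limb i of x, for i < h (Python/emod semantics, b > 0)
lemma emod_pow_ediv_emod (b : Int) (hb : 0 < b) (h i : Nat) (hih : i < h) (x : Int) :
    (x % b ^ h) / b ^ i % b = x / b ^ i % b := by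
  have hbh : (0:Int) < b ^ h := pow_pos hb h
  have hbi : (0:Int) < b ^ i := pow_pos hb i
  have hx : x = x % b ^ h + b ^ i * (b ^ (h - i - 1) * b * (x / b ^ h)) := by
    have : b ^ i * (b ^ (h - i - 1) * b) = b ^ h := by
      rw [← pow_succ, ← pow_add]
      congr 1; omega
    calc x = b ^ h * (x / b ^ h) + x % b ^ h := (Int.mul_ediv_add_emod x (b ^ h)).symm
    _ = x % b ^ h + b ^ i * (b ^ (h - i - 1) * b * (x / b ^ h)) := by rw [← this]; ring
  conv_rhs => rw [hx]
  rw [Int.add_mul_ediv_left _ _ (ne_of_gt hbi)]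
  have h2 : b ^ (h - i - 1) * b * (x / b ^ h) = b * (b ^ (h - i - 1) * (x / b ^ h)) := by ring
  rw [h2, Int.add_mul_emod_self_left]

-- the helper _limbs equals the limb map: divide-and-conquer splits the range of limb indices
-- (the low recursive argument x - ((x >> s) << s) is exactly x % 2^s, any sign of x)
lemma limbs_eq_map (n : Int) (hn : 0 ≤ n) : ∀ (m : Nat) (k x : Int) (out : List String), k.toNat = m →
    pvLimbs n k x out
      = out ++ (List.range m).map (fun i => PySem.Int.toStr (x / (2 ^ n.toNat : Int) ^ i % (2 ^ n.toNat : Int))) := by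
  intro m
  induction m using Nat.strong_induction_on with
  | _ m ih =>
    intro k x out hkm
    by_cases hk0 : k ≤ 0
    · rw [pvLimbs]
      simp [hk0, (by omega : m = 0)]
    · by_cases hk1 : k = 1
      · subst hk1
        have hm1 : m = 1 := by omega
        rw [pvLimbs]
        norm_num [hm1, List.range_one,
          PySem.Int.mod_eq_emod_of_pos (show (0:Int) < 2 ^ n.toNat by positivity)]
      · rw [pvLimbs]
        simp only [hk0, if_false, hk1, if_false]
        set h : Int := PySem.Int.floordiv k 2 with hh
        have hhb : 1 ≤ h ∧ h < k := by
          rw [hh, PySem.Int.floordiv_eq_ediv_of_pos (by omega : (0:Int) < 2)]; omega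
        have hbpos : (0:Int) < 2 ^ n.toNat := by positivity
        have hexp : (n * h).toNat = n.toNat * h.toNat := by
          rcases Int.eq_ofNat_of_zero_le hn with ⟨a, rfl⟩
          rcases Int.eq_ofNat_of_zero_le (by omega : (0:Int) ≤ h) with ⟨c, hc⟩
          rw [hc]; exact_mod_cast rfl
        have hq : x >>> (n * h).toNat = x / (2 ^ n.toNat : Int) ^ h.toNat := by
          rw [Int.shiftRight_eq_div_pow]; push_cast; rw [hexp, pow_mul]
        have hlow : x - ((x >>> (n * h).toNat) <<< (n * h).toNat)
            = x % (2 ^ n.toNat : Int) ^ h.toNat := by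
          rw [Int.shiftLeft_eq, hq, Int.emod_def, hexp, pow_mul]; ring
        have hsplit : m = h.toNat + (k - h).toNat := by omega
        rw [ih h.toNat (by omega) h _ out rfl, ih (k - h).toNat (by omega) (k - h) _ _ rfl,
            hsplit, List.range_add, List.map_append, List.map_map, List.append_assoc]
        congr 2
        · apply List.map_congr_left
          intro i hi
          rw [List.mem_range] at hi
          rw [hlow, emod_pow_ediv_emod _ hbpos h.toNat i hi x]
        · apply List.map_congr_left
          intro i _
          simp only [Function.comp_apply]
          congr 1
          rw [hq, Int.ediv_ediv_of_nonneg (pow_pos hbpos h.toNat).le,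
              ← pow_add, Nat.add_comm]

-- B (with its one-time normalization of negative x) equals the limb map too
lemma alt_eq_map (n : Int) (hn : 0 ≤ n) (k x : Int) :
    bigint_to_array_alt n k x
      = (List.range k.toNat).map (fun i => PySem.Int.toStr (x / (2 ^ n.toNat : Int) ^ i % (2 ^ n.toNat : Int))) := by
  unfold bigint_to_array_alt
  split_ifs with hneg
  · have hbpos : (0:Int) < 2 ^ n.toNat := by positivity
    have hexp : (n * k).toNat = n.toNat * k.toNat := by
      rcases Int.eq_ofNat_of_zero_le hn with ⟨a, rfl⟩
      rcases Int.eq_ofNat_of_zero_le (by omega : (0:Int) ≤ k) with ⟨c, hc⟩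
      rw [hc]; exact_mod_cast rfl
    rw [limbs_eq_map n hn k.toNat _ _ [] rfl, List.nil_append]
    apply List.map_congr_left
    intro i hi
    rw [List.mem_range] at hi
    rw [PySem.Int.mod_eq_emod_of_pos (by positivity), hexp, pow_mul,
        emod_pow_ediv_emod _ hbpos k.toNat i hi x]
  · rw [limbs_eq_map n hn k.toNat k x [] rfl, List.nil_append]

-- ===== VERDICT =====
theorem bigint_to_array_spec : Claim_equal_bigint_to_array := by
  intro n k x _ hn
  unfold Spec_bigint_to_array bigint_to_array
  rw [foldA_eq_limbsA, List.nil_append, limbsA_eq_map _ (by positivity),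
      PySem.List.length_pyRange_one, alt_eq_map n hn k x]
  norm_num
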